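-- pv_equiv track=rewrite | github.com/NIH-NEI/RPEOrganelle_Segmenter | src/RPE_Mask_RCNN/util.py | slice_area
-- ===== SOURCE A (Python) =====
-- def slice_area(asize, tsize, minovl=200):
--     aw = int(asize[1])
--     ah = int(asize[0])
--     w = int(tsize[1])
--     h = int(tsize[0])
--     #
--     res = []
--     if aw < w or ah < h:
--         return res
--     #
--     nxt = aw // w + 1
--     xovl = (nxt*w - aw) // (nxt - 1)
--     while xovl < minovl:
--         nxt += 1
--         xovl = (nxt*w - aw) // (nxt - 1)
--     #
--     nyt = ah // h + 1
--     yovl = (nyt*h - ah) // (nyt - 1)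
--     while yovl < minovl:
--         nyt += 1
--         yovl = (nyt*h - ah) // (nyt - 1)
--     #
--     hw = w//2
--     hh = h//2
--     xmax = aw - 1
--     ymax = ah - 1
--     #
--     xstep = aw // nxt
--     ystep = ah // nyt
--     #
--     for yc in range(nyt):
--         y0 = yc * ystep + ystep//2 - hh
--         if y0 < 0: y0 = 0
--         y1 = y0 + h - 1
--         if y1 > ymax:
--             y1 = ymax
--             y0 = y1 - h + 1
--         for xc in range(nxt):
--             x0 = xc * xstep + xstep//2 - hw
--             if x0 < 0: x0 = 0
--             x1 = x0 + w - 1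
--             if x1 > xmax:
--                 x1 = xmax
--                 x0 = x1 - w + 1
--             res.append((x0, x1, y0, y1))
--     return res
-- ===== SOURCE B (Python) =====
-- def slice_area(asize, tsize, minovl=200):
--     ah, aw = int(asize[0]), int(asize[1])
--     h, w = int(tsize[0]), int(tsize[1])
--     if aw < w or ah < h:
--         return []
--
--     def starts(L, t):
--         n = L // t + 1
--         if (n * t - L) // (n - 1) < minovl:
--             # jump straight to the smallest sufficient count: ceil((L-minovl)/(t-minovl))
--             n = -(-(L - minovl) // (t - minovl))
--         step = L // n
--         return [min(max(i * step + step // 2 - t // 2, 0), L - t) for i in range(n)]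
--
--     xs = starts(aw, w)
--     ys = starts(ah, h)
--     return [(x, x + w - 1, y, y + h - 1) for y in ys for x in xs]
-- ===== Notes on version B (the rewrite author's own statement) =====
-- stated objective: alternative
-- what changed: B replaces A's incrementing while-loop search for the tile count by a single overlap test followed by a closed-form ceiling-division jump to the smallest sufficient count, replaces A's two-sided conditional clamping of each (start,end) pair by a single min/max clamp of the start alone, computes each axis's start list once, and emits the grid as a cartesian product instead of A's nested loop recomputing every x-span per row.
-- outside the precondition, e.g. on slice_area((5, 5), (-2, -2), -100): A returns [], B returns []
import Mathlib
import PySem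

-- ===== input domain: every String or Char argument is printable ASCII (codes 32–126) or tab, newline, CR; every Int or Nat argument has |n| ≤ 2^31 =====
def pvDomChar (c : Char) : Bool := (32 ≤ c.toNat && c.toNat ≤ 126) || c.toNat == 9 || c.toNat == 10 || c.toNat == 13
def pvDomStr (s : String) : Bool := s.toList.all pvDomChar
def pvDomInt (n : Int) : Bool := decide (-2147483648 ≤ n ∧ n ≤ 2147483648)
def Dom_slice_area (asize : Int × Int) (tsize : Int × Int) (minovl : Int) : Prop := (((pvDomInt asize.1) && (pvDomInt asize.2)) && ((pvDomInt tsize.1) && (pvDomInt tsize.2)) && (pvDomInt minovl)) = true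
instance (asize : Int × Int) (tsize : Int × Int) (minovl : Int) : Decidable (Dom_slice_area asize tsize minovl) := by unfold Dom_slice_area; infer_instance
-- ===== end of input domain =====

-- B replaces A's incrementing while-loop search for the tile count by one overlap test plus a
-- closed-form ceiling-division jump, clamps each tile by a single min/max on the start instead of
-- A's two-sided conditional adjustment, and emits the grid as a cartesian product of two start
-- lists.  Objective: alternative (no speed claim).

-- ===== PORT A =====
-- 'while ovl < minovl: n += 1' loop of A; the fuel (|L|+2 at the call sites) strictly exceeds the
-- number of iterations Python performs on every input admitted by Pre_.
def ovlLoopA (L t minovl : Int) : Nat → Int → Int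
  | 0, n => n
  | fuel + 1, n =>
    if PySem.Int.floordiv (n * t - L) (n - 1) < minovl then
      ovlLoopA L t minovl fuel (n + 1)
    else n

def slice_area (asize : Int × Int) (tsize : Int × Int) (minovl : Int) : List (Int × Int × Int × Int) :=
  let aw := asize.2
  let ah := asize.1
  let w := tsize.2
  let h := tsize.1
  if aw < w ∨ ah < h then []
  else
    let nxt := ovlLoopA aw w minovl (aw.natAbs + 2) (PySem.Int.floordiv aw w + 1)
    let nyt := ovlLoopA ah h minovl (ah.natAbs + 2) (PySem.Int.floordiv ah h + 1)
    let hw := PySem.Int.floordiv w 2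
    let hh := PySem.Int.floordiv h 2
    let xmax := aw - 1
    let ymax := ah - 1
    let xstep := PySem.Int.floordiv aw nxt
    let ystep := PySem.Int.floordiv ah nyt
    (PySem.List.pyRange 0 nyt 1).foldl (fun res yc =>
      let y0 := yc * ystep + PySem.Int.floordiv ystep 2 - hh
      let y0 := if y0 < 0 then 0 else y0
      let y1 := y0 + h - 1
      let p := if y1 > ymax then (ymax - h + 1, ymax) else (y0, y1)
      (PySem.List.pyRange 0 nxt 1).foldl (fun res2 xc =>
        let x0 := xc * xstep + PySem.Int.floordiv xstep 2 - hw
        let x0 := if x0 < 0 then 0 else x0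
        let x1 := x0 + w - 1
        let q := if x1 > xmax then (xmax - w + 1, xmax) else (x0, x1)
        res2 ++ [(q.1, q.2, p.1, p.2)]) res) []

-- ===== PORT B =====
def ntilesB (L t minovl : Int) : Int :=
  let n := PySem.Int.floordiv L t + 1
  if PySem.Int.floordiv (n * t - L) (n - 1) < minovl then
    -(PySem.Int.floordiv (-(L - minovl)) (t - minovl))
  else n

def startsB (L t minovl : Int) : List Int :=
  let n := ntilesB L t minovl
  let step := PySem.Int.floordiv L n
  (PySem.List.pyRange 0 n 1).map (fun i =>
    min (max (i * step + PySem.Int.floordiv step 2 - PySem.Int.floordiv t 2) 0) (L - t))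

def slice_area_alt (asize : Int × Int) (tsize : Int × Int) (minovl : Int) : List (Int × Int × Int × Int) :=
  let ah := asize.1
  let aw := asize.2
  let h := tsize.1
  let w := tsize.2
  if aw < w ∨ ah < h then []
  else
    let xs := startsB aw w minovl
    let ys := startsB ah h minovl
    ys.flatMap (fun y => xs.map (fun x => (x, x + w - 1, y, y + h - 1)))

-- ===== PRECONDITION & SPEC =====
-- Pre_ excludes inputs where Python A does not return: with a non-positive tile dimension whose
-- area dimension is at least as large, A hits ZeroDivisionError or hangs (in a few such degenerate
-- sign combinations A instead returns [] via an empty range — those accidental values are also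
-- excluded, see the cite); with minovl larger than the achievable overlap (tile size, minus one
-- when the area is strictly larger) the while loop never terminates.
def Pre_slice_area (asize : Int × Int) (tsize : Int × Int) (minovl : Int) : Prop :=
  asize.2 < tsize.2 ∨ asize.1 < tsize.1 ∨
  (1 ≤ tsize.2 ∧ 1 ≤ tsize.1 ∧
   minovl ≤ tsize.2 - (if tsize.2 < asize.2 then 1 else 0) ∧
   minovl ≤ tsize.1 - (if tsize.1 < asize.1 then 1 else 0))
instance (asize : Int × Int) (tsize : Int × Int) (minovl : Int) : Decidable (Pre_slice_area asize tsize minovl) := by unfold Pre_slice_area; infer_instance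

def pvWitness_slice_area : (Int × Int) × (Int × Int) × Int := ((500, 600), (256, 256), 50)

def Spec_slice_area (asize : Int × Int) (tsize : Int × Int) (minovl : Int) (out : List (Int × Int × Int × Int)) : Prop := out = slice_area_alt asize tsize minovl
instance (asize : Int × Int) (tsize : Int × Int) (minovl : Int) (out : List (Int × Int × Int × Int)) : Decidable (Spec_slice_area asize tsize minovl out) := by unfold Spec_slice_area; infer_instance

-- ===== CLAIM (what is proved, stated in full; the proofs are below) =====
def Claim_equal_slice_area : Prop := ∀ (asize : Int × Int) (tsize : Int × Int) (minovl : Int), Dom_slice_area asize tsize minovl → Pre_slice_area asize tsize minovl → Spec_slice_area asize tsize minovl (slice_area asize tsize minovl)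

-- ===== LEMMAS AND PROOFS =====

-- A's loop returns N if the condition is false at N, holds strictly below N, and the fuel suffices.
theorem ovlLoopA_run (L t m N : Int)
    (hstop : ¬ PySem.Int.floordiv (N * t - L) (N - 1) < m) :
    ∀ (fuel : Nat) (n : Int), n ≤ N → (N - n).toNat < fuel →
      (∀ k, n ≤ k → k < N → PySem.Int.floordiv (k * t - L) (k - 1) < m) →
      ovlLoopA L t m fuel n = N := by
  intro fuel
  induction fuel with
  | zero => intro n _ hf _; omega
  | succ f ih =>
    intro n hn hf hbelow
    by_cases he : n = N
    · subst he; simp [ovlLoopA, hstop]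
    · have hlt : n < N := lt_of_le_of_ne hn he
      have hc := hbelow n le_rfl hlt
      simp only [ovlLoopA, if_pos hc]
      exact ih (n + 1) (by omega) (by omega) (fun k hk1 hk2 => hbelow k (by omega) hk2)

-- The loop condition as a linear inequality (divisor n-1 > 0).
theorem cond_iff (L t m n : Int) (hn : 2 ≤ n) :
    (PySem.Int.floordiv (n * t - L) (n - 1) < m) ↔ n * t - L < m * (n - 1) := by
  rw [PySem.Int.floordiv_lt_iff_lt_mul (show (0:Int) < n - 1 by omega)]

-- Under Pre_ (guard already passed: t ≤ L, 1 ≤ t, m ≤ t - [t < L]) A's loop equals B's closed form.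
theorem ntiles_eq (L t m : Int) (h1 : 1 ≤ t) (h2 : t ≤ L)
    (h3 : m ≤ t - (if t < L then 1 else 0)) :
    ovlLoopA L t m (L.natAbs + 2) (PySem.Int.floordiv L t + 1) = ntilesB L t m := by
  set q := PySem.Int.floordiv L t with hq
  have hqb : q * t ≤ L ∧ L < (q + 1) * t :=
    (PySem.Int.floordiv_eq_iff_of_pos (a := L) (b := t) (q := q) (by omega)).1 hq.symm
  have hq1 : 1 ≤ q := by nlinarith [hqb.1, hqb.2]
  set n0 := q + 1 with hn0
  have hn02 : 2 ≤ n0 := by omega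
  have hn0t : L < n0 * t := by nlinarith [hqb.2]
  by_cases hc : PySem.Int.floordiv (n0 * t - L) (n0 - 1) < m
  · -- the initial count is insufficient: A iterates up to the least sufficient count,
    -- B jumps there by ceiling division; show they are the same number
    have hcl : n0 * t - L < m * (n0 - 1) := (cond_iff L t m n0 hn02).1 hc
    have hm1 : 1 ≤ m := by nlinarith
    have htm : m < t := by
      by_contra hmt
      have hLt : L = t := by
        by_contra hne
        have : t < L := by omega
        simp [this] at h3
        omega
      have hq2 : q = 1 := by nlinarith [hqb.1, hqb.2]
      have : n0 = 2 := by omega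
      rw [this, hLt] at hcl
      omega
    set d := t - m with hd
    have hdpos : 0 < d := by omega
    set need := -(PySem.Int.floordiv (-(L - m)) d) with hneed
    have hneedb : (need - 1) * d < L - m ∧ L - m ≤ need * d :=
      (PySem.Int.neg_floordiv_neg_eq_iff_of_pos (a := L - m) (b := d) (q := need)
        (by omega)).1 hneed.symm
    have hinit : n0 * d < L - m := by nlinarith
    have hgt : n0 < need := by nlinarith [hneedb.2]
    have hneed1 : 1 ≤ need := by nlinarith [hneedb.2]
    have hneedL : need ≤ L - m := by nlinarith [hneedb.1]
    have hstop : ¬ PySem.Int.floordiv (need * t - L) (need - 1) < m := by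
      rw [cond_iff L t m need (by omega)]
      nlinarith [hneedb.2]
    have hrun := ovlLoopA_run L t m need hstop (L.natAbs + 2) n0 (by omega) (by omega)
      (fun k hk1 hk2 => by
        rw [cond_iff L t m k (by omega)]
        have : k * d ≤ (need - 1) * d := by nlinarith
        nlinarith [hneedb.1])
    rw [hrun]
    simp only [ntilesB, ← hq, ← hn0]
    rw [if_pos hc, ← hd, ← hneed]
  · -- the initial count already satisfies the overlap: both return it unchanged
    have hrun := ovlLoopA_run L t m n0 hc (L.natAbs + 2) n0 le_rfl (by omega)
      (fun k hk1 hk2 => absurd (lt_of_le_of_lt hk1 hk2) (lt_irrefl _))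
    rw [hrun]
    simp only [ntilesB, ← hq, ← hn0]
    rw [if_neg hc]

-- A's two-sided conditional clamp of a span equals B's min/max clamp of the start (unconditional).
theorem span_eq (s t L : Int) :
    (let x0 := if s < 0 then 0 else s
     let x1 := x0 + t - 1
     if x1 > L - 1 then ((L - 1) - t + 1, L - 1) else (x0, x1)) =
    (min (max s 0) (L - t), min (max s 0) (L - t) + t - 1) := by
  simp only []
  split_ifs <;> rw [Prod.mk.injEq] <;> exact ⟨by omega, by omega⟩

-- ===== VERDICT (by name: the statement is the Claim_ definition above) =====
theorem slice_area_spec : Claim_equal_slice_area := by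
  intro asize tsize minovl _ hpre
  unfold Spec_slice_area slice_area slice_area_alt startsB
  by_cases hg : asize.2 < tsize.2 ∨ asize.1 < tsize.1
  · simp only [if_pos hg]
  · simp only [if_neg hg]
    push Not at hg
    rcases hpre with h | h | ⟨hw1, hh1, hmw, hmh⟩
    · omega
    · omega
    have hx := ntiles_eq asize.2 tsize.2 minovl hw1 hg.1 hmw
    have hy := ntiles_eq asize.1 tsize.1 minovl hh1 hg.2 hmh
    rw [hx, hy]
    simp only [PySem.List.foldl_append_singleton_eq_map, PySem.List.foldl_append_eq_flatMap,
      List.nil_append, List.flatMap_map, List.map_map]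
    apply List.flatMap_congr
    intro y _
    apply List.map_congr_left
    intro x _
    have hxs := span_eq (x * PySem.Int.floordiv asize.2 (ntilesB asize.2 tsize.2 minovl) +
        PySem.Int.floordiv (PySem.Int.floordiv asize.2 (ntilesB asize.2 tsize.2 minovl)) 2 -
        PySem.Int.floordiv tsize.2 2) tsize.2 asize.2
    have hys := span_eq (y * PySem.Int.floordiv asize.1 (ntilesB asize.1 tsize.1 minovl) +
        PySem.Int.floordiv (PySem.Int.floordiv asize.1 (ntilesB asize.1 tsize.1 minovl)) 2 -
        PySem.Int.floordiv tsize.1 2) tsize.1 asize.1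
    simp only [] at hxs hys ⊢
    rw [hxs, hys]
    rfl
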